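-- pv_equiv track=rewrite | github.com/tongosu/ddonilang | solutions/seamgrim_ui_mvp/tools/export_graph.py | normalize_inline_statements
-- ===== SOURCE A (Python) =====
-- def normalize_inline_statements(input_text: str) -> str:
--     out: list[str] = []
--     in_string = False
--     in_line_comment = False
--     escape = False
--     i = 0
--     while i < len(input_text):
--         ch = input_text[i]
--         if in_line_comment:
--             out.append(ch)
--             if ch == "\n":
--                 in_line_comment = False
--             i += 1
--             continue
--         if in_string:
--             out.append(ch)
--             if escape:
--                 escape = False
--             elif ch == "\\":
--                 escape = True
--             elif ch == '"':
--                 in_string = False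
--             i += 1
--             continue
--         if ch == "/" and i + 1 < len(input_text) and input_text[i + 1] == "/":
--             in_line_comment = True
--             out.append(ch)
--             out.append(input_text[i + 1])
--             i += 2
--             continue
--         if ch == '"':
--             in_string = True
--             out.append(ch)
--             i += 1
--             continue
--         if ch == "." and i + 1 < len(input_text) and input_text[i + 1] in (" ", "\t"):
--             out.append(".")
--             i += 1
--             while i < len(input_text) and input_text[i] in (" ", "\t"):
--                 i += 1
--             out.append("\n")
--             continue
--         out.append(ch)
--         i += 1
--     return "".join(out)
-- ===== SOURCE B (Python) =====
-- import re
--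
-- def normalize_inline_statements(input_text: str) -> str:
--     # Two-pass: partition into (kind, span) where kind is 'code' or 'other'
--     # (string literal / line comment), then regex-normalize code spans only.
--     n = len(input_text)
--     spans = []
--     i = 0
--     while i < n:
--         ch = input_text[i]
--         if ch == '"':
--             j = i + 1
--             esc = False
--             while j < n:
--                 c = input_text[j]
--                 j += 1
--                 if esc:
--                     esc = False
--                 elif c == '\\':
--                     esc = True
--                 elif c == '"':
--                     break
--             spans.append(('other', input_text[i:j]))
--             i = j
--         elif ch == '/' and i + 1 < n and input_text[i + 1] == '/':
--             j = input_text.find('\n', i)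
--             j = n if j == -1 else j + 1
--             spans.append(('other', input_text[i:j]))
--             i = j
--         else:
--             j = i + 1
--             while j < n:
--                 c = input_text[j]
--                 if c == '"' or (c == '/' and j + 1 < n and input_text[j + 1] == '/'):
--                     break
--                 j += 1
--             spans.append(('code', input_text[i:j]))
--             i = j
--     return ''.join(t if k == 'other' else re.sub(r'\.[ \t]+', '.\n', t)
--                    for k, t in spans)
-- ===== Notes on version B (the rewrite author's own statement) =====
-- stated objective: alternative
-- what changed: A's single forward character loop with in_string/in_comment/escape flags and inline dot handling is replaced by a two-pass decomposition: first partition the text into labelled code, string-literal and line-comment spans, then rewrite only the code spans with a regex substitution collapsing a dot plus a run of spaces/tabs into a dot plus newline, and concatenate the spans.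
import Mathlib
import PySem

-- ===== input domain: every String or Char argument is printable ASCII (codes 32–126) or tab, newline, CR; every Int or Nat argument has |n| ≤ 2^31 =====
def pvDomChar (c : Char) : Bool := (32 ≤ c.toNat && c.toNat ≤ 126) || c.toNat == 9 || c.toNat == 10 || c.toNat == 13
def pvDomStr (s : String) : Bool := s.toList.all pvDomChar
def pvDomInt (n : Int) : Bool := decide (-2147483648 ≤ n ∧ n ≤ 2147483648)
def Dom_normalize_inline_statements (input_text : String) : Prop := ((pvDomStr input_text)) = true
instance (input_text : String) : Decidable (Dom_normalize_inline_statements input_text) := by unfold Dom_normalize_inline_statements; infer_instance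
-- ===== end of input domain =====

-- B replaces A's single-pass five-state loop by a two-pass decomposition (partition into
-- code/string/comment spans, then a regex-style dot+whitespace rewrite on code spans only);
-- objective: alternative structure, same cost.

-- ===== PORT A =====
def pvIsWs (c : Char) : Bool := c = ' ' || c = '\t'

-- literal port of A's while loop: state (in_string, in_line_comment, escape, out), index
-- advance rendered as recursion on the remaining suffix
def goA : List Char → Bool → Bool → Bool → List Char → List Char
  | [], _, _, _, out => out
  | c :: rest, inStr, inCom, esc, out =>
    if inCom then
      goA rest inStr (if c = '\n' then false else true) esc (out ++ [c])
    else if inStr then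
      if esc then goA rest inStr inCom false (out ++ [c])
      else if c = '\\' then goA rest inStr inCom true (out ++ [c])
      else if c = '"' then goA rest false inCom esc (out ++ [c])
      else goA rest inStr inCom esc (out ++ [c])
    else if c = '/' ∧ rest.head? = some '/' then
      goA rest.tail inStr true esc (out ++ [c, '/'])
    else if c = '"' then goA rest true inCom esc (out ++ [c])
    else if c = '.' ∧ (rest.head? = some ' ' ∨ rest.head? = some '\t') then
      goA (rest.dropWhile pvIsWs) inStr inCom esc (out ++ ['.', '\n'])
    else goA rest inStr inCom esc (out ++ [c])
  termination_by cs _ _ _ _ => cs.length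
  decreasing_by
  all_goals first
    | (simp; done)
    | (simp [List.length_tail]; omega)
    | (have := List.length_dropWhile_le pvIsWs rest; simp; omega)

def normalize_inline_statements (input_text : String) : String :=
  String.mk (goA input_text.toList false false false [])

-- ===== PORT B =====
-- scan of a string literal body (after the opening quote), with backslash escapes
def scanString : List Char → Bool → List Char × List Char
  | [], _ => ([], [])
  | c :: rest, esc =>
    if esc then let p := scanString rest false; (c :: p.1, p.2)
    else if c = '\\' then let p := scanString rest true; (c :: p.1, p.2)
    else if c = '"' then ([c], rest)
    else let p := scanString rest false; (c :: p.1, p.2)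

-- scan of a line-comment body up to and including the newline
def scanComment : List Char → List Char × List Char
  | [] => ([], [])
  | c :: rest => if c = '\n' then ([c], rest)
                 else let p := scanComment rest; (c :: p.1, p.2)

def pvWsNext (l : List Char) : Bool :=
  match l.head? with | some r => pvIsWs r | none => false

def pvBreaksCode (c : Char) (rest : List Char) : Bool :=
  c = '"' || (c = '/' && rest.head? = some '/')

-- scan of a code span: up to the next string literal or line comment start
def scanCode : List Char → List Char × List Char
  | [] => ([], [])
  | c :: rest =>
    if pvBreaksCode c rest then ([], c :: rest)
    else let p := scanCode rest; (c :: p.1, p.2)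

-- hand port of re.sub(r'\.[ \t]+', '.\n', t): leftmost, non-overlapping matches;
-- exact for this pattern (a match is a '.' followed by the maximal run of spaces/tabs)
def subDot : List Char → List Char
  | [] => []
  | c :: rest =>
    if c = '.' ∧ pvWsNext rest = true then
      '.' :: '\n' :: subDot (rest.dropWhile pvIsWs)
    else c :: subDot rest
  termination_by l => l.length
  decreasing_by
  · have := List.length_dropWhile_le pvIsWs rest; simp; omega
  · simp

-- length bounds used by `segments`' termination
theorem scanString_len (cs : List Char) (esc : Bool) : (scanString cs esc).2.length ≤ cs.length := by
  induction cs generalizing esc with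
  | nil => simp [scanString]
  | cons c rest ih =>
    simp only [scanString]
    split_ifs <;> simp <;> first | omega | (exact le_trans (ih _) (by omega))

theorem scanComment_len (cs : List Char) : (scanComment cs).2.length ≤ cs.length := by
  induction cs with
  | nil => simp [scanComment]
  | cons c rest ih => simp only [scanComment]; split_ifs <;> simp <;> omega

theorem scanCode_len (cs : List Char) : (scanCode cs).2.length ≤ cs.length := by
  induction cs with
  | nil => simp [scanCode]
  | cons c rest ih => simp only [scanCode]; split_ifs <;> simp <;> omega

-- partition the input into labelled spans (true = code, false = string/comment)
def segments : List Char → List (Bool × List Char)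
  | [] => []
  | c :: rest =>
    if c = '"' then
      let p := scanString rest false
      (false, c :: p.1) :: segments p.2
    else if c = '/' ∧ rest.head? = some '/' then
      let p := scanComment rest.tail
      (false, c :: '/' :: p.1) :: segments p.2
    else
      let p := scanCode rest
      (true, c :: p.1) :: segments p.2
  termination_by l => l.length
  decreasing_by
  · have := scanString_len rest false; simp; omega
  · have h := scanComment_len rest.tail
    have : rest.tail.length ≤ rest.length := by cases rest <;> simp
    simp; omega
  · have := scanCode_len rest; simp; omega

def render (segs : List (Bool × List Char)) : List Char :=
  segs.flatMap (fun p => if p.1 then subDot p.2 else p.2)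

def normalize_inline_statements_alt (input_text : String) : String :=
  String.mk (render (segments input_text.toList))

-- ===== PRECONDITION & SPEC =====
def Spec_normalize_inline_statements (input_text : String) (out : String) : Prop := out = normalize_inline_statements_alt input_text
instance (input_text : String) (out : String) : Decidable (Spec_normalize_inline_statements input_text out) := by unfold Spec_normalize_inline_statements; infer_instance

-- ===== CLAIM (what is proved, stated in full; the proofs are below) =====
def Claim_equal_normalize_inline_statements : Prop := ∀ (input_text : String), Dom_normalize_inline_statements input_text → Spec_normalize_inline_statements input_text (normalize_inline_statements input_text)

-- ===== LEMMAS AND PROOFS =====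

theorem goA_acc (cs : List Char) (inStr inCom esc : Bool) (out : List Char) :
    goA cs inStr inCom esc out = out ++ goA cs inStr inCom esc [] := by
  match cs with
  | [] => simp [goA]
  | c :: rest =>
    rw [goA, goA]
    split_ifs <;>
      (first
        | (rw [goA_acc rest, goA_acc rest _ _ _ (([] : List Char) ++ _)]; simp)
        | (rw [goA_acc rest.tail, goA_acc rest.tail _ _ _ (([] : List Char) ++ _)]; simp)
        | (rw [goA_acc (rest.dropWhile pvIsWs), goA_acc (rest.dropWhile pvIsWs) _ _ _ (([] : List Char) ++ _)]; simp))
  termination_by cs.length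
  decreasing_by
  all_goals first
    | (simp; done)
    | (simp [List.length_tail]; omega)
    | (have := List.length_dropWhile_le pvIsWs rest; simp; omega)

theorem goA_comment (cs : List Char) (inStr esc : Bool) :
    goA cs inStr true esc [] =
      (scanComment cs).1 ++ goA (scanComment cs).2 inStr false esc [] := by
  induction cs with
  | nil => simp [goA, scanComment]
  | cons c rest ih =>
    rw [goA, scanComment]
    by_cases h : c = '\n'
    · simp only [if_pos h]
      conv_lhs => rw [goA_acc]
      simp
    · simp only [if_neg h]
      conv_lhs => rw [goA_acc]
      rw [ih]; simp

theorem goA_string (cs : List Char) (esc : Bool) :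
    goA cs true false esc [] =
      (scanString cs esc).1 ++ goA (scanString cs esc).2 false false false [] := by
  induction cs generalizing esc with
  | nil => simp [goA, scanString]
  | cons c rest ih =>
    rw [goA, scanString]
    cases esc with
    | true =>
      simp only [show ((false = true) = False) by simp, show ((true = true) = True) by simp,
        if_false, if_true]
      conv_lhs => rw [goA_acc]
      rw [ih]; simp
    | false =>
      by_cases h1 : c = '\\'
      · simp only [h1]
        simp only [show ((false = true) = False) by simp, if_false, if_pos rfl]
        conv_lhs => rw [goA_acc]
        rw [ih]; simp
      · by_cases h2 : c = '"'
        · subst h2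
          simp only [show ((false = true) = False) by simp, if_false, if_neg h1, if_pos rfl]
          conv_lhs => rw [goA_acc]
          simp
        · simp only [show ((false = true) = False) by simp, if_false, if_neg h1, if_neg h2]
          conv_lhs => rw [goA_acc]
          rw [ih]; simp

theorem render_eq (ys : List Char) :
    render (segments ys) = subDot ((scanCode ys).1) ++ render (segments ((scanCode ys).2)) := by
  match ys with
  | [] => simp [segments, scanCode, render, subDot]
  | c :: rest =>
    by_cases hb : pvBreaksCode c rest = true
    · rw [scanCode]
      simp only [if_pos hb]
      simp [subDot]
    · replace hb : pvBreaksCode c rest = false := by simpa using hb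
      have h1 : ¬ (c = '"') := by
        intro h; rw [h] at hb; simp [pvBreaksCode] at hb
      have h2 : ¬ (c = '/' ∧ rest.head? = some '/') := by
        rintro ⟨rfl, h⟩; simp [pvBreaksCode, h] at hb
      rw [segments, scanCode]
      simp [h1, h2, hb, render]

theorem pvIsWs_not_breaks (c : Char) (rest : List Char) (h : pvIsWs c = true) :
    pvBreaksCode c rest = false := by
  have hc : c = ' ' ∨ c = '\t' := by simpa [pvIsWs] using h
  rcases hc with rfl | rfl <;> simp [pvBreaksCode]

theorem scanCode_ws (c : Char) (rest : List Char) (h : pvIsWs c = true) :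
    scanCode (c :: rest) = (c :: (scanCode rest).1, (scanCode rest).2) := by
  rw [scanCode]
  simp [pvIsWs_not_breaks c rest h]

theorem scanCode_dropWhile (rest : List Char) :
    scanCode (rest.dropWhile pvIsWs) =
      ((scanCode rest).1.dropWhile pvIsWs, (scanCode rest).2) := by
  induction rest with
  | nil => simp [scanCode]
  | cons c t ih =>
    by_cases h : pvIsWs c = true
    · rw [List.dropWhile_cons_of_pos h, scanCode_ws c t h, ih]
      simp [List.dropWhile_cons_of_pos h]
    · replace h : pvIsWs c = false := by simpa using h
      rw [List.dropWhile_cons_of_neg (by simp [h]), scanCode]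
      by_cases hb : pvBreaksCode c t = true
      · simp [hb, scanCode]
      · replace hb : pvBreaksCode c t = false := by simpa using hb
        simp [hb, List.dropWhile_cons_of_neg, h, scanCode]

theorem scanCode_fst_head (xs : List Char) :
    (scanCode xs).1.head? = none ∨ (scanCode xs).1.head? = xs.head? := by
  match xs with
  | [] => simp [scanCode]
  | c :: rest =>
    rw [scanCode]
    by_cases hb : pvBreaksCode c rest = true
    · simp [hb]
    · replace hb : pvBreaksCode c rest = false := by simpa using hb
      simp [hb]

theorem goA_main (cs : List Char) :
    goA cs false false false [] = render (segments cs) := by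
  match cs with
  | [] => simp [goA, segments, render]
  | c :: rest =>
    rw [goA, segments]
    by_cases h2 : c = '/' ∧ rest.head? = some '/'
    · have h1 : ¬ (c = '"') := by rw [h2.1]; decide
      simp only [show ((false = true) = False) by simp, if_false, if_pos h2, if_neg h1, if_true]
      conv_lhs => rw [goA_acc]
      rw [goA_comment, goA_main (scanComment rest.tail).2]
      simp [render, h2.1]
    · by_cases h1 : c = '"'
      · subst h1
        simp only [show ((false = true) = False) by simp, if_false, if_neg h2, if_pos rfl,
          if_true]
        conv_lhs => rw [goA_acc]
        rw [goA_string rest false, goA_main (scanString rest false).2]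
        simp [render]
      · by_cases h3 : c = '.' ∧ (rest.head? = some ' ' ∨ rest.head? = some '\t')
        · simp only [show ((false = true) = False) by simp, if_false, if_neg h2, if_neg h1,
            if_pos h3, if_true]
          conv_lhs => rw [goA_acc]
          rw [goA_main (rest.dropWhile pvIsWs), render_eq (rest.dropWhile pvIsWs),
            scanCode_dropWhile rest]
          obtain ⟨rfl, hws⟩ := h3
          obtain ⟨a, t, rfl⟩ : ∃ a t, rest = a :: t := by
            rcases hws with h | h <;> (cases rest with
              | nil => simp at h
              | cons a t => exact ⟨a, t, rfl⟩)
          have ha : pvIsWs a = true := by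
            rcases hws with h | h <;> simp_all [pvIsWs]
          rw [scanCode_ws a t ha]
          simp [render, subDot, pvWsNext, ha, List.dropWhile_cons_of_pos ha]
        · simp only [show ((false = true) = False) by simp, if_false, if_neg h2, if_neg h1,
            if_neg h3, if_true]
          conv_lhs => rw [goA_acc]
          rw [goA_main rest, render_eq rest]
          have hsub : subDot (c :: (scanCode rest).1) = c :: subDot ((scanCode rest).1) := by
            rw [subDot]
            have hcond : ¬ (c = '.' ∧ pvWsNext ((scanCode rest).1) = true) := by
              rintro ⟨rfl, hw⟩
              rcases scanCode_fst_head rest with hh | hh <;>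
                unfold pvWsNext at hw <;> rw [hh] at hw
              · simp at hw
              · match hr : rest.head? with
                | none => rw [hr] at hw; simp at hw
                | some r =>
                  rw [hr] at hw
                  have : r = ' ' ∨ r = '\t' := by simpa [pvIsWs] using hw
                  rcases this with rfl | rfl <;> exact h3 ⟨rfl, by simp [hr]⟩
            rw [if_neg hcond]
          simp [render, hsub]
  termination_by cs.length
  decreasing_by
  all_goals first
    | (simp; done)
    | (have h := scanComment_len rest.tail
       have : rest.tail.length ≤ rest.length := by cases rest <;> simp
       simp; omega)
    | (have := scanString_len rest false; simp; omega)
    | (have := List.length_dropWhile_le pvIsWs rest; simp; omega)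

-- ===== VERDICT (by name: the statement is the Claim_ definition above) =====
theorem normalize_inline_statements_spec : Claim_equal_normalize_inline_statements := by
  intro s _
  unfold Spec_normalize_inline_statements normalize_inline_statements normalize_inline_statements_alt
  rw [goA_main]
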